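-- pv_equiv track=rewrite | github.com/sword59720/quant-system | core/exposure_gate.py | _build_fold_indices
-- ===== SOURCE A (Python) =====
-- def _build_fold_indices(n_rows, groups, test_group_ids, embargo_days):
--     idx = []
--     for gid in test_group_ids:
--         s, e = groups[gid]
--         s2 = s + embargo_days
--         e2 = e - embargo_days
--         if e2 <= s2:
--             continue
--         idx.extend(range(s2, e2))
--     idx = sorted(set(i for i in idx if 0 <= i < n_rows))
--     return idx
-- ===== SOURCE B (Python) =====
-- def _build_fold_indices(n_rows, groups, test_group_ids, embargo_days):
--     # clamp each group's embargoed window to [0, n_rows), sort by start,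
--     # then merge overlapping windows and emit them in one sorted pass
--     iv = []
--     for gid in test_group_ids:
--         s, e = groups[gid]
--         lo = max(s + embargo_days, 0)
--         hi = min(e - embargo_days, n_rows)
--         if lo < hi:
--             iv.append((lo, hi))
--     iv.sort(key=lambda t: t[0])
--     res = []
--     cur = None
--     for lo, hi in iv:
--         if cur is None:
--             cur = (lo, hi)
--         elif lo <= cur[1]:
--             if hi > cur[1]:
--                 cur = (cur[0], hi)
--         else:
--             res.extend(range(cur[0], cur[1]))
--             cur = (lo, hi)
--     if cur is not None:
--         res.extend(range(cur[0], cur[1]))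
--     return res
-- ===== Notes on version B (the rewrite author's own statement) =====
-- stated objective: alternative
-- what changed: Instead of collecting every index of every group window into one list and then set-deduplicating and sorting the elements, B clamps each window to [0, n_rows), sorts the windows by start, merges overlapping ones in one pass and emits the merged ranges already sorted and duplicate-free.
import Mathlib
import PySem

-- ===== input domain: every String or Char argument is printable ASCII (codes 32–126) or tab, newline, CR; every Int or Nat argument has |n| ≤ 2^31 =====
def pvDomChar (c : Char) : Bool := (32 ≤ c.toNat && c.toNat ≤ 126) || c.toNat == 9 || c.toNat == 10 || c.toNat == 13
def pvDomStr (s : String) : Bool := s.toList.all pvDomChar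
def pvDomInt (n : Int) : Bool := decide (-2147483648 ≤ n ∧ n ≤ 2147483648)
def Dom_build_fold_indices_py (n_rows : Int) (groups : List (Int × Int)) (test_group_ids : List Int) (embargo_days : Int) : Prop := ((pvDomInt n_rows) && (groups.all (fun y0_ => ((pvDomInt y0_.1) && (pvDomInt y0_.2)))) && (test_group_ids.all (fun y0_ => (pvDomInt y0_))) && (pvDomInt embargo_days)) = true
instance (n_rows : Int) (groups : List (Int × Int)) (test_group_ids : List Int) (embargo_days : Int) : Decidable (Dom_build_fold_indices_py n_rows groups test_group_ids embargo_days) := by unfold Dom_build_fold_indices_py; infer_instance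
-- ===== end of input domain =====

-- B replaces "collect all indices, set-dedup, sort" by "clamp windows, sort by start, merge, emit";
-- objective: alternative decomposition (interval merge instead of element-level dedup+sort).

-- ===== PORT A =====
def build_fold_indices_py (n_rows : Int) (groups : List (Int × Int)) (test_group_ids : List Int) (embargo_days : Int) : List Int :=
  let idx := test_group_ids.foldl (fun idx gid =>
    let se := PySem.List.pyGetD groups gid (0, 0)
    let s2 := se.1 + embargo_days
    let e2 := se.2 - embargo_days
    if e2 ≤ s2 then idx else idx ++ PySem.List.pyRange s2 e2 1) []
  PySem.List.sorted (PySem.Set.ofList (idx.filter (fun i => decide (0 ≤ i) && decide (i < n_rows)))) (fun x => x) false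

-- ===== PORT B =====
-- one step of B's merge-and-emit loop: state = (res, cur)
def pvEmitStep (st : List Int × Option (Int × Int)) (p : Int × Int) : List Int × Option (Int × Int) :=
  match st.2 with
  | none => (st.1, some p)
  | some (clo, chi) =>
    if p.1 ≤ chi then
      if chi < p.2 then (st.1, some (clo, p.2)) else (st.1, some (clo, chi))
    else (st.1 ++ PySem.List.pyRange clo chi 1, some p)

-- B's final flush of cur
def pvEmitFinish (st : List Int × Option (Int × Int)) : List Int :=
  match st.2 with
  | none => st.1
  | some (clo, chi) => st.1 ++ PySem.List.pyRange clo chi 1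

def build_fold_indices_py_alt (n_rows : Int) (groups : List (Int × Int)) (test_group_ids : List Int) (embargo_days : Int) : List Int :=
  let iv := test_group_ids.foldl (fun iv gid =>
    let se := PySem.List.pyGetD groups gid (0, 0)
    let lo := max (se.1 + embargo_days) 0
    let hi := min (se.2 - embargo_days) n_rows
    if lo < hi then iv ++ [(lo, hi)] else iv) []
  let ivs := PySem.List.sorted iv (fun t => t.1) false
  pvEmitFinish (ivs.foldl pvEmitStep ([], none))

-- ===== PRECONDITION & SPEC =====
-- Pre_ excludes exactly the inputs where A raises IndexError: some gid in
-- test_group_ids outside Python's (negative-wrapping) index range of groups.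
def Pre_build_fold_indices_py (n_rows : Int) (groups : List (Int × Int)) (test_group_ids : List Int) (embargo_days : Int) : Prop :=
  ∀ gid ∈ test_group_ids, PySem.Raise.InRange groups.length gid
instance (n_rows : Int) (groups : List (Int × Int)) (test_group_ids : List Int) (embargo_days : Int) : Decidable (Pre_build_fold_indices_py n_rows groups test_group_ids embargo_days) := by unfold Pre_build_fold_indices_py; infer_instance

def pvWitness_build_fold_indices_py : Int × (List (Int × Int)) × List Int × Int := (5, [(0, 5)], [0], 1)

def Spec_build_fold_indices_py (n_rows : Int) (groups : List (Int × Int)) (test_group_ids : List Int) (embargo_days : Int) (out : List Int) : Prop := out = build_fold_indices_py_alt n_rows groups test_group_ids embargo_days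
instance (n_rows : Int) (groups : List (Int × Int)) (test_group_ids : List Int) (embargo_days : Int) (out : List Int) : Decidable (Spec_build_fold_indices_py n_rows groups test_group_ids embargo_days out) := by unfold Spec_build_fold_indices_py; infer_instance

-- ===== CLAIM (what is proved, stated in full; the proofs are below) =====
def Claim_equal_build_fold_indices_py : Prop := ∀ (n_rows : Int) (groups : List (Int × Int)) (test_group_ids : List Int) (embargo_days : Int), Dom_build_fold_indices_py n_rows groups test_group_ids embargo_days → Pre_build_fold_indices_py n_rows groups test_group_ids embargo_days → Spec_build_fold_indices_py n_rows groups test_group_ids embargo_days (build_fold_indices_py n_rows groups test_group_ids embargo_days)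

-- ===== LEMMAS AND PROOFS =====

-- membership in A's accumulated index list
theorem pv_memA (groups : List (Int × Int)) (embargo_days : Int) (tg : List Int) (acc : List Int) (i : Int) :
    i ∈ tg.foldl (fun idx gid =>
      let se := PySem.List.pyGetD groups gid (0, 0)
      let s2 := se.1 + embargo_days
      let e2 := se.2 - embargo_days
      if e2 ≤ s2 then idx else idx ++ PySem.List.pyRange s2 e2 1) acc
    ↔ i ∈ acc ∨ ∃ gid ∈ tg,
        (PySem.List.pyGetD groups gid (0, 0)).1 + embargo_days ≤ i ∧
        i < (PySem.List.pyGetD groups gid (0, 0)).2 - embargo_days := by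
  induction tg generalizing acc with
  | nil => simp
  | cons g t ih =>
    simp only [List.foldl_cons, ih]
    by_cases h : (PySem.List.pyGetD groups g (0, 0)).2 - embargo_days ≤ (PySem.List.pyGetD groups g (0, 0)).1 + embargo_days
    · simp only [if_pos h]
      constructor
      · rintro (h1 | ⟨gid, hg, h2⟩)
        · exact Or.inl h1
        · exact Or.inr ⟨gid, List.mem_cons_of_mem _ hg, h2⟩
      · rintro (h1 | ⟨gid, hg, h2, h3⟩)
        · exact Or.inl h1
        · rcases List.mem_cons.mp hg with rfl | hg
          · omega
          · exact Or.inr ⟨gid, hg, h2, h3⟩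
    · simp only [if_neg h, List.mem_append, PySem.List.mem_pyRange_one]
      constructor
      · rintro ((h1 | h1) | ⟨gid, hg, h2⟩)
        · exact Or.inl h1
        · exact Or.inr ⟨g, List.mem_cons_self, h1.1, h1.2⟩
        · exact Or.inr ⟨gid, List.mem_cons_of_mem _ hg, h2⟩
      · rintro (h1 | ⟨gid, hg, h2, h3⟩)
        · exact Or.inl (Or.inl h1)
        · rcases List.mem_cons.mp hg with rfl | hg
          · exact Or.inl (Or.inr ⟨h2, h3⟩)
          · exact Or.inr ⟨gid, hg, h2, h3⟩

-- membership in B's interval list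
theorem pv_memIv (n_rows : Int) (groups : List (Int × Int)) (embargo_days : Int) (tg : List Int)
    (acc : List (Int × Int)) (p : Int × Int) :
    p ∈ tg.foldl (fun iv gid =>
      let se := PySem.List.pyGetD groups gid (0, 0)
      let lo := max (se.1 + embargo_days) 0
      let hi := min (se.2 - embargo_days) n_rows
      if lo < hi then iv ++ [(lo, hi)] else iv) acc
    ↔ p ∈ acc ∨ ∃ gid ∈ tg,
        p = (max ((PySem.List.pyGetD groups gid (0, 0)).1 + embargo_days) 0,
             min ((PySem.List.pyGetD groups gid (0, 0)).2 - embargo_days) n_rows) ∧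
        p.1 < p.2 := by
  induction tg generalizing acc with
  | nil => simp
  | cons g t ih =>
    simp only [List.foldl_cons, ih]
    by_cases h : max ((PySem.List.pyGetD groups g (0, 0)).1 + embargo_days) 0 <
        min ((PySem.List.pyGetD groups g (0, 0)).2 - embargo_days) n_rows
    · simp only [if_pos h, List.mem_append, List.mem_singleton]
      constructor
      · rintro ((h1 | h1) | ⟨gid, hg, h2⟩)
        · exact Or.inl h1
        · exact Or.inr ⟨g, List.mem_cons_self, by subst h1; exact ⟨rfl, h⟩⟩
        · exact Or.inr ⟨gid, List.mem_cons_of_mem _ hg, h2⟩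
      · rintro (h1 | ⟨gid, hg, h2, h3⟩)
        · exact Or.inl (Or.inl h1)
        · rcases List.mem_cons.mp hg with rfl | hg
          · exact Or.inl (Or.inr h2)
          · exact Or.inr ⟨gid, hg, h2, h3⟩
    · simp only [if_neg h]
      constructor
      · rintro (h1 | ⟨gid, hg, h2⟩)
        · exact Or.inl h1
        · exact Or.inr ⟨gid, List.mem_cons_of_mem _ hg, h2⟩
      · rintro (h1 | ⟨gid, hg, h2, h3⟩)
        · exact Or.inl h1
        · rcases List.mem_cons.mp hg with rfl | hg
          · subst h2; exact absurd h3 h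
          · exact Or.inr ⟨gid, hg, h2, h3⟩

-- correctness of B's merge-and-emit loop
theorem pv_emit_spec (l : List (Int × Int)) (res : List Int) (clo chi : Int)
    (hsort : l.Pairwise (fun a b => a.1 ≤ b.1))
    (hstart : ∀ p ∈ l, clo ≤ p.1)
    (hres : res.Pairwise (· < ·))
    (hlt : ∀ r ∈ res, r < clo) :
    (pvEmitFinish (l.foldl pvEmitStep (res, some (clo, chi)))).Pairwise (· < ·) ∧
    ∀ i, i ∈ pvEmitFinish (l.foldl pvEmitStep (res, some (clo, chi))) ↔
      (i ∈ res ∨ (clo ≤ i ∧ i < chi) ∨ ∃ p ∈ l, p.1 ≤ i ∧ i < p.2) := by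
  induction l generalizing res clo chi with
  | nil =>
    constructor
    · simp only [List.foldl_nil, pvEmitFinish]
      refine List.pairwise_append.mpr ⟨hres, PySem.List.pairwise_lt_pyRange_one clo chi, ?_⟩
      intro r hr x hx
      have := (PySem.List.mem_pyRange_one).mp hx
      have := hlt r hr
      omega
    · intro i
      simp only [List.foldl_nil, pvEmitFinish, List.mem_append, PySem.List.mem_pyRange_one,
        List.mem_nil_iff]
      tauto
  | cons p t ih =>
    have hcl : clo ≤ p.1 := hstart p List.mem_cons_self
    simp only [List.foldl_cons, pvEmitStep]
    by_cases h1 : p.1 ≤ chi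
    · by_cases h2 : chi < p.2
      · simp only [if_pos h1, if_pos h2]
        obtain ⟨hp, hm⟩ := ih res clo p.2 hsort.of_cons
          (fun q hq => le_trans hcl ((List.pairwise_cons.mp hsort).1 q hq)) hres hlt
        refine ⟨hp, fun i => ?_⟩
        rw [hm i]
        constructor
        · rintro (h | h | h)
          · exact Or.inl h
          · by_cases hi : i < chi
            · exact Or.inr (Or.inl ⟨h.1, hi⟩)
            · exact Or.inr (Or.inr ⟨p, List.mem_cons_self, by omega⟩)
          · obtain ⟨q, hq, hiq⟩ := h
            exact Or.inr (Or.inr ⟨q, List.mem_cons_of_mem _ hq, hiq⟩)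
        · rintro (h | h | ⟨q, hq, hiq⟩)
          · exact Or.inl h
          · exact Or.inr (Or.inl ⟨h.1, by omega⟩)
          · rcases List.mem_cons.mp hq with rfl | hq
            · exact Or.inr (Or.inl ⟨by omega, by omega⟩)
            · exact Or.inr (Or.inr ⟨q, hq, hiq⟩)
      · simp only [if_pos h1, if_neg h2]
        obtain ⟨hp, hm⟩ := ih res clo chi hsort.of_cons
          (fun q hq => le_trans hcl ((List.pairwise_cons.mp hsort).1 q hq)) hres hlt
        refine ⟨hp, fun i => ?_⟩
        rw [hm i]
        constructor
        · rintro (h | h | ⟨q, hq, hiq⟩)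
          · exact Or.inl h
          · exact Or.inr (Or.inl h)
          · exact Or.inr (Or.inr ⟨q, List.mem_cons_of_mem _ hq, hiq⟩)
        · rintro (h | h | ⟨q, hq, hiq⟩)
          · exact Or.inl h
          · exact Or.inr (Or.inl h)
          · rcases List.mem_cons.mp hq with rfl | hq
            · exact Or.inr (Or.inl ⟨by omega, by omega⟩)
            · exact Or.inr (Or.inr ⟨q, hq, hiq⟩)
    · simp only [if_neg h1]
      have hres' : (res ++ PySem.List.pyRange clo chi 1).Pairwise (· < ·) := by
        refine List.pairwise_append.mpr ⟨hres, PySem.List.pairwise_lt_pyRange_one clo chi, ?_⟩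
        intro r hr x hx
        have := (PySem.List.mem_pyRange_one).mp hx
        have := hlt r hr
        omega
      have hlt' : ∀ r ∈ res ++ PySem.List.pyRange clo chi 1, r < p.1 := by
        intro r hr
        rcases List.mem_append.mp hr with hr | hr
        · have := hlt r hr; omega
        · have := (PySem.List.mem_pyRange_one).mp hr; omega
      obtain ⟨hp, hm⟩ := ih (res ++ PySem.List.pyRange clo chi 1) p.1 p.2 hsort.of_cons
        (fun q hq => (List.pairwise_cons.mp hsort).1 q hq) hres' hlt'
      refine ⟨hp, fun i => ?_⟩
      rw [hm i]
      simp only [List.mem_append, PySem.List.mem_pyRange_one]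
      constructor
      · rintro ((h | h) | h | ⟨q, hq, hiq⟩)
        · exact Or.inl h
        · exact Or.inr (Or.inl h)
        · exact Or.inr (Or.inr ⟨p, List.mem_cons_self, h⟩)
        · exact Or.inr (Or.inr ⟨q, List.mem_cons_of_mem _ hq, hiq⟩)
      · rintro (h | h | ⟨q, hq, hiq⟩)
        · exact Or.inl (Or.inl h)
        · exact Or.inl (Or.inr h)
        · rcases List.mem_cons.mp hq with rfl | hq
          · exact Or.inr (Or.inl hiq)
          · exact Or.inr (Or.inr ⟨q, hq, hiq⟩)

-- B's output is strictly increasing and covers exactly the union of its sorted intervals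
theorem pv_alt_char (ivs : List (Int × Int)) (hsort : ivs.Pairwise (fun a b => a.1 ≤ b.1)) :
    (pvEmitFinish (ivs.foldl pvEmitStep ([], none))).Pairwise (· < ·) ∧
    ∀ i, i ∈ pvEmitFinish (ivs.foldl pvEmitStep ([], none)) ↔ ∃ p ∈ ivs, p.1 ≤ i ∧ i < p.2 := by
  cases ivs with
  | nil => simp [pvEmitFinish]
  | cons p t =>
    have hstep : pvEmitStep ([], none) p = ([], some (p.1, p.2)) := rfl
    simp only [List.foldl_cons, hstep]
    obtain ⟨hp, hm⟩ := pv_emit_spec t [] p.1 p.2 hsort.of_cons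
      ((List.pairwise_cons.mp hsort).1) List.Pairwise.nil (by simp)
    refine ⟨hp, fun i => ?_⟩
    rw [hm i]
    constructor
    · rintro (h | h | ⟨q, hq, hiq⟩)
      · simp at h
      · exact ⟨p, List.mem_cons_self, h⟩
      · exact ⟨q, List.mem_cons_of_mem _ hq, hiq⟩
    · rintro ⟨q, hq, hiq⟩
      rcases List.mem_cons.mp hq with rfl | hq
      · exact Or.inr (Or.inl hiq)
      · exact Or.inr (Or.inr ⟨q, hq, hiq⟩)

-- ===== VERDICT (by name: the statement is the Claim_ definition above) =====
theorem build_fold_indices_py_spec : Claim_equal_build_fold_indices_py := by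
  intro n_rows groups tg emb _ _
  unfold Spec_build_fold_indices_py build_fold_indices_py build_fold_indices_py_alt
  set idx := tg.foldl (fun idx gid =>
    let se := PySem.List.pyGetD groups gid (0, 0)
    let s2 := se.1 + emb
    let e2 := se.2 - emb
    if e2 ≤ s2 then idx else idx ++ PySem.List.pyRange s2 e2 1) [] with hidx
  set iv := tg.foldl (fun iv gid =>
    let se := PySem.List.pyGetD groups gid (0, 0)
    let lo := max (se.1 + emb) 0
    let hi := min (se.2 - emb) n_rows
    if lo < hi then iv ++ [(lo, hi)] else iv) [] with hiv
  set ivs := PySem.List.sorted iv (fun t => t.1) false with hivs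
  show PySem.List.sorted (PySem.Set.ofList (idx.filter (fun i => decide (0 ≤ i) && decide (i < n_rows)))) (fun x => x) false = pvEmitFinish (List.foldl pvEmitStep ([], none) ivs)
  have hsort : ivs.Pairwise (fun a b => a.1 ≤ b.1) := PySem.List.sorted_pairwise iv (fun t => t.1)
  obtain ⟨hpw, hmem⟩ := pv_alt_char ivs hsort
  -- same membership on both sides
  have hsame : ∀ i, i ∈ pvEmitFinish (ivs.foldl pvEmitStep ([], none)) ↔
      i ∈ PySem.Set.ofList (idx.filter (fun i => decide (0 ≤ i) && decide (i < n_rows))) := by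
    intro i
    rw [hmem i, PySem.Set.mem_ofList, List.mem_filter]
    have hA := pv_memA groups emb tg [] i
    have hIv := fun p => pv_memIv n_rows groups emb tg [] p
    rw [← hidx] at hA
    constructor
    · rintro ⟨p, hp, hip⟩
      rw [PySem.List.mem_sorted] at hp
      obtain ⟨gid, hg, hpe, _⟩ := ((hIv p).mp (hiv ▸ hp)).resolve_left (by simp)
      subst hpe
      simp only at hip
      obtain ⟨h1, h2⟩ := hip
      refine ⟨hA.mpr (Or.inr ⟨gid, hg, by omega, by omega⟩), ?_⟩
      simp only [Bool.and_eq_true, decide_eq_true_eq]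
      exact ⟨by omega, by omega⟩
    · rintro ⟨hi, hb⟩
      simp only [Bool.and_eq_true, decide_eq_true_eq] at hb
      obtain ⟨gid, hg, h1, h2⟩ := (hA.mp hi).resolve_left (by simp)
      refine ⟨(max ((PySem.List.pyGetD groups gid (0, 0)).1 + emb) 0,
               min ((PySem.List.pyGetD groups gid (0, 0)).2 - emb) n_rows), ?_, by
                 constructor <;> simp only [] <;> omega⟩
      rw [PySem.List.mem_sorted, hiv, hIv]
      refine Or.inr ⟨gid, hg, rfl, ?_⟩
      simp only []
      omega
  have hnd1 : (pvEmitFinish (ivs.foldl pvEmitStep ([], none))).Nodup :=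
    hpw.imp (fun h => ne_of_lt h)
  have hnd2 : (PySem.Set.ofList (idx.filter (fun i => decide (0 ≤ i) && decide (i < n_rows)))).Nodup :=
    PySem.Set.nodup_ofList _
  have hperm : (pvEmitFinish (ivs.foldl pvEmitStep ([], none))).Perm
      (PySem.Set.ofList (idx.filter (fun i => decide (0 ≤ i) && decide (i < n_rows)))) :=
    (List.perm_ext_iff_of_nodup hnd1 hnd2).mpr hsame
  exact PySem.List.sorted_eq_of_perm_of_pairwise_lt _ _ _ hperm hpw
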